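-- pv_equiv track=rewrite | github.com/kkr010128/codebert | problem127/problem127_42.py | f
-- ===== SOURCE A (Python) =====
-- def f(X, Y):
--     for i in range(X + 1):
--         for j in range(X + 1):
--             kame = i
--             tsuru = j
--             if kame + tsuru == X and kame * 4 + tsuru * 2 == Y:
--                 return 'Yes'
--     return 'No'
-- ===== SOURCE B (Python) =====
-- def f(X, Y):
--     k = Y - 2 * X
--     return 'Yes' if X >= 0 and k % 2 == 0 and 0 <= k <= 2 * X else 'No'
-- ===== Notes on version B (the rewrite author's own statement) =====
-- stated objective: faster
-- what changed: Replaces the O(X^2) double loop over (kame,tsuru) pairs with the closed-form solution of the linear system: kame = (Y-2X)/2 exists iff Y-2X is even and lies in [0, 2X].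
import Mathlib
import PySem

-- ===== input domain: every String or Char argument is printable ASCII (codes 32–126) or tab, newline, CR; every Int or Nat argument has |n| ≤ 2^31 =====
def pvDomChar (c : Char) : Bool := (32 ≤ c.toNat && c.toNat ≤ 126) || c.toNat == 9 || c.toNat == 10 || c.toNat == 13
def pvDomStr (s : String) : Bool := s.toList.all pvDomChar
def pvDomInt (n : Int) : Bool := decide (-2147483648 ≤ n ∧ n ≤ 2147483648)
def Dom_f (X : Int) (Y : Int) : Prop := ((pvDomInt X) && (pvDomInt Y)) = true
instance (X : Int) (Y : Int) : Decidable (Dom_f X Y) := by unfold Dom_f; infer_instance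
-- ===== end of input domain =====

-- B replaces A's O(X^2) pair search by the closed-form solution of the linear system (faster).

-- ===== PORT A =====
-- early-return nested 'for' loops: findSome? over range(X+1), returning the first 'Yes'
def f (X : Int) (Y : Int) : String :=
  match (PySem.List.pyRange 0 (X + 1) 1).findSome? (fun i =>
    (PySem.List.pyRange 0 (X + 1) 1).findSome? (fun j =>
      let kame := i
      let tsuru := j
      if kame + tsuru = X ∧ kame * 4 + tsuru * 2 = Y then some "Yes" else none)) with
  | some s => s
  | none => "No"

-- ===== PORT B =====
def f_alt (X : Int) (Y : Int) : String :=
  let k := Y - 2 * X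
  if 0 ≤ X ∧ PySem.Int.mod k 2 = 0 ∧ 0 ≤ k ∧ k ≤ 2 * X then "Yes" else "No"

-- ===== PRECONDITION & SPEC =====
def Spec_f (X : Int) (Y : Int) (out : String) : Prop := out = f_alt X Y
instance (X : Int) (Y : Int) (out : String) : Decidable (Spec_f X Y out) := by unfold Spec_f; infer_instance

-- ===== CLAIM (what is proved, stated in full; the proofs are below) =====
def Claim_equal_f : Prop := ∀ (X : Int) (Y : Int), Dom_f X Y → Spec_f X Y (f X Y)

-- ===== LEMMAS AND PROOFS =====

theorem f_exists_iff (X Y : Int) :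
    (∃ i ∈ PySem.List.pyRange 0 (X + 1) 1, ∃ j ∈ PySem.List.pyRange 0 (X + 1) 1,
      i + j = X ∧ i * 4 + j * 2 = Y) ↔
    (0 ≤ X ∧ PySem.Int.mod (Y - 2 * X) 2 = 0 ∧ 0 ≤ Y - 2 * X ∧ Y - 2 * X ≤ 2 * X) := by
  have hm : PySem.Int.mod (Y - 2 * X) 2 = (Y - 2 * X) % 2 :=
    PySem.Int.mod_eq_emod_of_pos (by norm_num)
  simp only [PySem.List.mem_pyRange_one, hm]
  constructor
  · rintro ⟨i, ⟨hi0, hi1⟩, j, ⟨hj0, hj1⟩, he1, he2⟩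
    omega
  · rintro ⟨hX, hmod, hk0, hk1⟩
    refine ⟨(Y - 2 * X) / 2, ⟨by omega, by omega⟩, X - (Y - 2 * X) / 2, ⟨by omega, by omega⟩, by omega, by omega⟩

-- ===== VERDICT (by name: the statement is the Claim_ definition above) =====
theorem f_spec : Claim_equal_f := by
  intro X Y _
  unfold Spec_f f f_alt
  have hiff := f_exists_iff X Y
  cases h : (PySem.List.pyRange 0 (X + 1) 1).findSome? (fun i =>
      (PySem.List.pyRange 0 (X + 1) 1).findSome? (fun j =>
        let kame := i
        let tsuru := j
        if kame + tsuru = X ∧ kame * 4 + tsuru * 2 = Y then some "Yes" else none)) with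
  | none =>
      simp only [List.findSome?_eq_none_iff] at h
      rw [if_neg]
      intro hc
      obtain ⟨i, hi, j, hj, he⟩ := hiff.mpr ⟨hc.1, hc.2⟩
      have := h i hi j hj
      simp [he.1, he.2] at this
  | some s =>
      obtain ⟨i, hi, hsi⟩ := List.exists_of_findSome?_eq_some h
      obtain ⟨j, hj, hsj⟩ := List.exists_of_findSome?_eq_some hsi
      simp only [] at hsj
      split_ifs at hsj with hcond
      · cases hsj
        rw [if_pos]
        have := hiff.mp ⟨i, hi, j, hj, hcond.1, hcond.2⟩
        exact ⟨this.1, this.2⟩
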